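-- pv_equiv track=rewrite | github.com/abhishek25dh/exp-pipeline | layout_creator.py | count_tuple_matches
-- ===== SOURCE A (Python) =====
-- def count_tuple_matches(haystack_words, needle_tuple) -> int:
--     if not needle_tuple:
--         return 0
--     n = len(needle_tuple)
--     count = 0
--     for i in range(0, len(haystack_words) - n + 1):
--         if tuple(haystack_words[i : i + n]) == needle_tuple:
--             count += 1
--     return count
-- ===== SOURCE B (Python) =====
-- def count_tuple_matches(haystack_words, needle_tuple) -> int:
--     # Jump between candidate positions with list.index (scan for the first
--     # needle word, restricted to where a full window can still start),
--     # verifying only the remaining words at each candidate.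
--     needle = list(needle_tuple)
--     if not needle:
--         return 0
--     first = needle[0]
--     rest = needle[1:]
--     n = len(needle)
--     limit = len(haystack_words) - n + 1  # a match can only start before this
--     if limit <= 0:
--         return 0
--     count = 0
--     start = 0
--     while True:
--         try:
--             i = haystack_words.index(first, start, limit)
--         except ValueError:
--             return count
--         if haystack_words[i + 1 : i + n] == rest:
--             count += 1
--         start = i + 1
-- ===== Notes on version B (the rewrite author's own statement) =====
-- stated objective: alternative
-- what changed: Instead of building and comparing a full slice at every window position, B jumps between occurrences of the first needle word with list.index (bounded to where a full window can still start) and verifies only the remaining words at each candidate position.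
import Mathlib
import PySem

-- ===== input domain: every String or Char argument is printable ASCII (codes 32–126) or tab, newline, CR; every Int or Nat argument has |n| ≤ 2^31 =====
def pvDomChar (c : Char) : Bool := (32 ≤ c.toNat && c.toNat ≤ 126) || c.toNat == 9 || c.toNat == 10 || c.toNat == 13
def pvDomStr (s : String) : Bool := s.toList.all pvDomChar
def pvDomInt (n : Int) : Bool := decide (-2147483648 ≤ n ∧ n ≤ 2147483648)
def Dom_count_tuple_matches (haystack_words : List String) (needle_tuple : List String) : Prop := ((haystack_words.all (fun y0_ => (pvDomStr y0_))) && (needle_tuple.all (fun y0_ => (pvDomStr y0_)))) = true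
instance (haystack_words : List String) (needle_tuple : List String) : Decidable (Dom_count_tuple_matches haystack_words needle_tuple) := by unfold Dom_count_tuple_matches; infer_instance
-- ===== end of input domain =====

-- B replaces the per-position slice comparison by index-jumps to occurrences of the
-- first needle word, verifying only the tail at each candidate (same results everywhere).

-- ===== PORT A =====
def count_tuple_matches (haystack_words : List String) (needle_tuple : List String) : Int :=
  if needle_tuple = [] then 0
  else
    let n : Nat := needle_tuple.length
    (PySem.List.pyRange 0 ((haystack_words.length : Int) - (n : Int) + 1) 1).foldl
      (fun count i =>
        if PySem.List.slice haystack_words (some i) (some (i + (n : Int))) = needle_tuple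
        then count + 1 else count) 0

-- ===== PORT B =====
-- 'haystack_words.index(first, start, limit)' (search in haystack_words[start:limit];
-- ValueError = none) ported exactly as index? on that sublist, shifted back by start
-- (here always 0 <= start and start <= limit <= len, so the slice is take-then-drop).
def ctmIndexFrom (xs : List String) (v : String) (start limit : Nat) : Option Nat :=
  (PySem.List.index? ((xs.take limit).drop start) v).map (· + start)

def ctmLoop (h : List String) (first : String) (rest : List String) (n : Nat) (limit : Nat)
    (count : Int) (start : Nat) : Int :=
  match hidx : ctmIndexFrom h first start limit with
  | none => count
  | some i =>
      ctmLoop h first rest n limit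
        (if PySem.List.slice h (some ((i : Int) + 1)) (some ((i : Int) + (n : Int))) = rest
         then count + 1 else count)
        (i + 1)
termination_by h.length - start
decreasing_by
  rcases Option.map_eq_some_iff.mp hidx with ⟨k, hk, rfl⟩
  obtain ⟨hlt, -, -⟩ := PySem.List.getElem_of_index?_eq_some hk
  simp only [List.length_drop, List.length_take] at hlt
  omega

def count_tuple_matches_alt (haystack_words : List String) (needle_tuple : List String) : Int :=
  match needle_tuple with
  | [] => 0
  | first :: rest =>
      let n : Nat := rest.length + 1
      let limit : Int := (haystack_words.length : Int) - (n : Int) + 1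
      if limit ≤ 0 then 0
      else ctmLoop haystack_words first rest n limit.toNat 0 0

-- ===== PRECONDITION & SPEC =====
def Spec_count_tuple_matches (haystack_words : List String) (needle_tuple : List String) (out : Int) : Prop := out = count_tuple_matches_alt haystack_words needle_tuple
instance (haystack_words : List String) (needle_tuple : List String) (out : Int) : Decidable (Spec_count_tuple_matches haystack_words needle_tuple out) := by unfold Spec_count_tuple_matches; infer_instance

-- ===== CLAIM (what is proved, stated in full; the proofs are below) =====
def Claim_equal_count_tuple_matches : Prop := ∀ (haystack_words : List String) (needle_tuple : List String), Dom_count_tuple_matches haystack_words needle_tuple → Spec_count_tuple_matches haystack_words needle_tuple (count_tuple_matches haystack_words needle_tuple)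

-- ===== LEMMAS AND PROOFS =====

lemma ctmRange'_split (s m n : Nat) : List.range' s (m + n) = List.range' s m ++ List.range' (s + m) n := by
  induction m generalizing s with
  | zero => simp
  | succ m ih =>
      rw [show m + 1 + n = (m + n) + 1 by omega, List.range'_succ, List.range'_succ, ih (s + 1)]
      simp only [List.cons_append, List.cons.injEq, true_and]
      rw [show s + (m + 1) = s + 1 + m by omega]

-- "a match starts at position i": the window of needle length starting at i equals the needle
def ctmP (h : List String) (first : String) (rest : List String) (i : Nat) : Bool :=
  decide ((h.drop i).take (rest.length + 1) = first :: rest)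

lemma ctmP_false_of_head (h : List String) (first : String) (rest : List String) (i : Nat)
    (hi : i < h.length) (hne : h[i] ≠ first) : ctmP h first rest i = false := by
  simp only [ctmP, decide_eq_false_iff_not]
  intro heq
  rw [List.drop_eq_getElem_cons hi] at heq
  simp only [List.take_succ_cons, List.cons.injEq] at heq
  exact hne heq.1

lemma ctmP_at_hit (h : List String) (first : String) (rest : List String) (i : Nat)
    (hi : i < h.length) (hhit : h[i] = first) :
    ctmP h first rest i = decide ((h.drop (i + 1)).take rest.length = rest) := by
  simp only [ctmP]
  rw [List.drop_eq_getElem_cons hi, hhit]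
  simp [List.take_succ_cons]

lemma ctmLoop_spec (h : List String) (first : String) (rest : List String) (limit : Nat)
    (hlim : limit ≤ h.length) (count : Int) (start : Nat) :
    ctmLoop h first rest (rest.length + 1) limit count start
      = count + ((List.range' start (limit - start)).countP (ctmP h first rest) : Int) := by
  fun_induction ctmLoop h first rest (rest.length + 1) limit count start with
  | case1 count start hidx =>
      -- no further occurrence of the first word before limit: no further match
      have hnone : first ∉ (h.take limit).drop start := by
        have := Option.map_eq_none_iff.mp hidx
        exact (PySem.List.index?_eq_none_iff _ _).mp this
      have hzero : (List.range' start (limit - start)).countP (ctmP h first rest) = 0 := by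
        rw [List.countP_eq_zero]
        intro i hi
        rw [List.mem_range'_1] at hi
        obtain ⟨hi1, hi2⟩ := hi
        have hil : i < h.length := by omega
        have hne : h[i] ≠ first := by
          intro hEq
          apply hnone
          have hlen : i - start < ((h.take limit).drop start).length := by
            simp only [List.length_drop, List.length_take]; omega
          have hg : ((h.take limit).drop start)[i - start] = h[i] := by
            rw [List.getElem_drop, List.getElem_take]
            congr 1; omega
          rw [← hEq, ← hg]
          exact List.getElem_mem hlen
        simp [ctmP_false_of_head h first rest i hil hne]
      rw [hzero]; simp
  | case2 count start i hidx ih =>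
      rcases Option.map_eq_some_iff.mp hidx with ⟨k, hk, rfl⟩
      simp only [Nat.add_comm k start] at ih ⊢
      simp only [dite_eq_ite] at ih
      obtain ⟨hlt, hget, hmin⟩ := PySem.List.getElem_of_index?_eq_some hk
      simp only [List.length_drop, List.length_take] at hlt
      have hkstart : start + k < limit := by omega
      -- split the remaining positions at the found occurrence
      have hsplit : List.range' start (limit - start)
          = List.range' start k ++ (start + k) :: List.range' (start + k + 1) (limit - (start + k + 1)) := by
        rw [show limit - start = k + ((limit - (start + k + 1)) + 1) by omega,
           ctmRange'_split, List.range'_succ]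
      rw [hsplit]
      have hgetElem : ∀ (j : Nat) (hj : j < k + 1),
          ((h.take limit).drop start)[j]'(by omega) = h[start + j]'(by omega) := by
        intro j hj
        rw [List.getElem_drop, List.getElem_take]
      have hpre : (List.range' start k).countP (ctmP h first rest) = 0 := by
        rw [List.countP_eq_zero]
        intro j hj
        rw [List.mem_range'_1] at hj
        obtain ⟨hj1, hj2⟩ := hj
        have hjl : j < h.length := by omega
        have hne : h[j] ≠ first := by
          intro hEq
          have hji : j - start < k := by omega
          have hgj : ((h.take limit).drop start)[j - start]'(by omega) = h[j] := by
            rw [hgetElem (j - start) (by omega)]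
            congr 1; omega
          exact hmin (j - start) hji (hgj.trans hEq)
        simp [ctmP_false_of_head h first rest j hjl hne]
      rw [List.countP_append, hpre, List.countP_cons]
      -- the test performed at the hit equals ctmP there
      have hhit : h[start + k]'(by omega) = first := by
        rw [← hgetElem k (by omega)]
        exact hget
      have hcond : (PySem.List.slice h (some ((((start + k) : Nat) : Int) + 1))
            (some ((((start + k) : Nat) : Int) + ((rest.length + 1 : Nat) : Int))) = rest)
          ↔ ctmP h first rest (start + k) = true := by
        rw [ctmP_at_hit h first rest (start + k) (by omega) hhit]
        have e1 : ((((start + k) : Nat) : Int) + 1) = (((start + k + 1 : Nat)) : Int) := by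
          push_cast; ring
        have e2 : ((((start + k) : Nat) : Int) + ((rest.length + 1 : Nat) : Int))
            = (((start + k + 1 : Nat)) : Int) + ((rest.length : Nat) : Int) := by
          push_cast; ring
        rw [e1, e2, PySem.List.slice_natCast_add]
        simp
      rw [ih]
      by_cases hc : ctmP h first rest (start + k) = true
      · rw [if_pos (hcond.mpr hc), hc]
        simp only [if_true]
        push_cast; ring
      · rw [if_neg (fun hx => hc (hcond.mp hx))]
        simp only [Bool.not_eq_true] at hc
        rw [hc]
        simp only [Bool.false_eq_true, if_false]
        push_cast; ring

lemma countA_spec (h : List String) (first : String) (rest : List String) :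
    count_tuple_matches h (first :: rest)
      = (((List.range' 0 (((h.length : Int) - ((first :: rest).length : Int) + 1).toNat)).countP
          (ctmP h first rest) : Nat) : Int) := by
  rw [count_tuple_matches]
  simp only [if_neg (List.cons_ne_nil first rest)]
  rw [PySem.List.pyRange_one, List.foldl_map]
  simp only [zero_add, Int.sub_zero]
  rw [PySem.List.foldl_ite_add_one (fun k : Nat =>
        PySem.List.slice h (some (k : Int)) (some ((k : Int) + ((first :: rest).length : Int)))
          = first :: rest)]
  rw [← List.range_eq_range']
  have hcnt : (List.range (((h.length : Int) - ((first :: rest).length : Int) + 1).toNat)).countP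
        (fun k : Nat =>
          decide (PySem.List.slice h (some (k : Int)) (some ((k : Int) + ((first :: rest).length : Int)))
            = first :: rest))
      = (List.range (((h.length : Int) - ((first :: rest).length : Int) + 1).toNat)).countP
          (ctmP h first rest) := by
    apply List.countP_congr
    intro i _
    rw [PySem.List.slice_natCast_add]
    simp [ctmP]
  rw [hcnt]
  simp

-- ===== VERDICT (by name: the statement is the Claim_ definition above) =====
theorem count_tuple_matches_spec : Claim_equal_count_tuple_matches := by
  intro h t _
  unfold Spec_count_tuple_matches
  cases t with
  | nil => simp [count_tuple_matches, count_tuple_matches_alt]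
  | cons first rest =>
      rw [countA_spec, count_tuple_matches_alt]
      by_cases hlim : ((h.length : Int) - ((rest.length + 1 : Nat) : Int) + 1) ≤ 0
      · rw [if_pos hlim]
        rw [show (((h.length : Int) - ((first :: rest).length : Int) + 1).toNat) = 0 by
          simp only [List.length_cons]; omega]
        simp [List.range']
      · rw [if_neg hlim]
        rw [ctmLoop_spec h first rest _ (by omega) 0 0]
        simp only [List.length_cons, Nat.sub_zero, zero_add]
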